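-- pv_equiv track=rewrite | github.com/KIRUBAKARAN9840/tele-gym-type-back | app/fittbot_api/v1/client/client_api/chatbot/chatbot_services/report_analysis.py | sse_data
-- ===== SOURCE A (Python) =====
-- def sse_data(content: str) -> str:
--     """
--     Properly format content for SSE transmission with UTF-8 Unicode support.
--     SSE requires 'data: ' prefix and double newline. Content is sent as plain UTF-8.
--     Skips empty content to avoid sending blank messages.
--     """
--     if isinstance(content, bytes):
--         content = content.decode('utf-8', errors='replace')
--
--     # Skip empty or whitespace-only content
--     if not content or not content.strip():
--         return ""
--
--     lines = content.split('\n')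
--     if len(lines) == 1:
--         return f"data: {content}\n\n"
--     else:
--         return ''.join(f"data: {line}\n" for line in lines) + "\n"
-- ===== SOURCE B (Python) =====
-- def sse_data(content: str) -> str:
--     if isinstance(content, bytes):
--         content = content.decode('utf-8', errors='replace')
--     if not content or not content.strip():
--         return ""
--     return "data: " + content.replace("\n", "\ndata: ") + "\n\n"
-- ===== Notes on version B (the rewrite author's own statement) =====
-- stated objective: simpler
-- what changed: Replaces the split-into-lines list, the single-line special-case branch and the per-line join loop with one string substitution that rewrites each newline into a newline plus the SSE prefix, building the payload in a single expression.
import Mathlib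
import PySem

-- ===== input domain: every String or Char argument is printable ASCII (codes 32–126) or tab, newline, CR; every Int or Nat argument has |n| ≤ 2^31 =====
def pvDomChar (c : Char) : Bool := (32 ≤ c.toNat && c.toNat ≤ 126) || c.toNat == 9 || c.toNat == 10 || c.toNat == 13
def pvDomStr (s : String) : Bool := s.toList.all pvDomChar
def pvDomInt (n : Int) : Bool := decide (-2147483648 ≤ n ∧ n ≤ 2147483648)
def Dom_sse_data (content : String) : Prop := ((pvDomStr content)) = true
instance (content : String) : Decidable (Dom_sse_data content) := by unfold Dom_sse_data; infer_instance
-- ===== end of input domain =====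

-- B drops the line-splitting, the single-line branch and the per-line join loop for one replace substitution (simpler).

-- ===== PORT A =====
def sse_data (content : String) : String :=
  -- the isinstance(bytes) branch cannot fire for a str argument and is dropped
  if content.toList = [] ∨ PySem.Chars.strip content.toList = [] then ""
  else
    let lines := PySem.Chars.splitOn content.toList "\n".toList
    if lines.length = 1 then
      String.ofList ("data: ".toList ++ content.toList ++ "\n\n".toList)
    else
      String.ofList (PySem.Chars.join [] (lines.map (fun l => "data: ".toList ++ l ++ "\n".toList)) ++ "\n".toList)

-- ===== PORT B =====
def sse_data_alt (content : String) : String :=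
  if content.toList = [] ∨ PySem.Chars.strip content.toList = [] then ""
  else
    String.ofList ("data: ".toList ++ PySem.Chars.replace content.toList "\n".toList "\ndata: ".toList ++ "\n\n".toList)

-- ===== PRECONDITION & SPEC =====
def Spec_sse_data (content : String) (out : String) : Prop := out = sse_data_alt content
instance (content : String) (out : String) : Decidable (Spec_sse_data content out) := by unfold Spec_sse_data; infer_instance

-- ===== CLAIM (what is proved, stated in full; the proofs are below) =====
def Claim_equal_sse_data : Prop := ∀ (content : String), Dom_sse_data content → Spec_sse_data content (sse_data content)

-- ===== LEMMAS AND PROOFS =====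

-- reference recursions the two fuelled go-loops are shown to compute
def repSpec (l : List Char) : List Char :=
  match l with
  | [] => []
  | c :: t => if c = '\n' then ['\n', 'd', 'a', 't', 'a', ':', ' '] ++ repSpec t else c :: repSpec t

def splitSpec (l cur : List Char) : List (List Char) :=
  match l with
  | [] => [cur.reverse]
  | c :: t => if c = '\n' then cur.reverse :: splitSpec t [] else splitSpec t (c :: cur)

theorem splitSpec_ne_nil (l : List Char) : ∀ (cur : List Char), splitSpec l cur ≠ [] := by
  induction l with
  | nil => intro cur; simp [splitSpec]
  | cons c t ih =>
    intro cur
    by_cases hc : c = '\n'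
    · subst hc; simp [splitSpec]
    · simpa [splitSpec, hc] using ih (c :: cur)

theorem intercalate_cons₂ (sep x y : List Char) (l : List (List Char)) :
    sep.intercalate (x :: y :: l) = x ++ sep ++ sep.intercalate (y :: l) := by
  simp [List.intercalate, List.intersperse]

theorem repGo_eq (l : List Char) : ∀ (fuel : Nat) (acc : List Char), l.length ≤ fuel →
    PySem.Chars.replace.go ['\n'] ['\n', 'd', 'a', 't', 'a', ':', ' '] fuel l acc
      = acc.reverse ++ repSpec l := by
  induction l with
  | nil =>
    intro fuel acc _
    cases fuel with
    | zero => simp [PySem.Chars.replace.go, repSpec]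
    | succ f => simp [PySem.Chars.replace.go, repSpec]
  | cons c t ih =>
    intro fuel acc h
    cases fuel with
    | zero => simp at h
    | succ f =>
      rw [PySem.Chars.replace.go]
      by_cases hc : c = '\n'
      · subst hc
        simp only [show List.isPrefixOf ['\n'] ('\n' :: t) = true by simp [List.isPrefixOf]]
        rw [show List.drop (List.length ['\n']) ('\n' :: t) = t by simp]
        rw [ih f _ (by simpa using Nat.le_of_succ_le_succ h)]
        simp [repSpec]
      · simp only [show List.isPrefixOf ['\n'] (c :: t) = false by
          simp [List.isPrefixOf]; exact fun h' => (hc h'.symm).elim]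
        rw [ih f _ (by simpa using Nat.le_of_succ_le_succ h)]
        simp [repSpec, hc]

theorem splitGo_eq (l : List Char) : ∀ (fuel : Nat) (cur : List Char) (acc : List (List Char)),
    l.length < fuel →
    PySem.Chars.splitOn.go ['\n'] fuel l cur acc = acc.reverse ++ splitSpec l cur := by
  induction l with
  | nil =>
    intro fuel cur acc h
    cases fuel with
    | zero => omega
    | succ f => simp [PySem.Chars.splitOn.go, splitSpec]
  | cons c t ih =>
    intro fuel cur acc h
    cases fuel with
    | zero => omega
    | succ f =>
      rw [PySem.Chars.splitOn.go]
      by_cases hc : c = '\n'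
      · subst hc
        simp only [show List.isPrefixOf ['\n'] ('\n' :: t) = true by simp [List.isPrefixOf]]
        rw [show List.drop (List.length ['\n']) ('\n' :: t) = t by simp]
        rw [ih f _ _ (by simpa using Nat.lt_of_succ_lt_succ h)]
        simp [splitSpec]
      · simp only [show List.isPrefixOf ['\n'] (c :: t) = false by
          simp [List.isPrefixOf]; exact fun h' => (hc h'.symm).elim]
        rw [ih f _ _ (by simpa using Nat.lt_of_succ_lt_succ h)]
        simp [splitSpec, hc]

theorem replace_eq_repSpec (l : List Char) :
    PySem.Chars.replace l ['\n'] ['\n', 'd', 'a', 't', 'a', ':', ' '] = repSpec l := by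
  rw [PySem.Chars.replace]
  simp only [show (['\n'] : List Char).isEmpty = false from rfl, Bool.false_eq_true, if_false]
  exact repGo_eq l l.length [] (le_refl _)

theorem splitOn_eq_splitSpec (l : List Char) :
    PySem.Chars.splitOn l ['\n'] = splitSpec l [] := by
  rw [PySem.Chars.splitOn]
  exact splitGo_eq l (l.length + 1) [] [] (by omega)

-- '\n'.join(s.split('\n')) == s, in splitSpec form
theorem join_splitSpec (l : List Char) : ∀ (cur : List Char),
    List.intercalate ['\n'] (splitSpec l cur) = cur.reverse ++ l := by
  induction l with
  | nil => intro cur; simp [splitSpec, List.intercalate]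
  | cons c t ih =>
    intro cur
    by_cases hc : c = '\n'
    · subst hc
      rw [show splitSpec ('\n' :: t) cur = cur.reverse :: splitSpec t [] by simp [splitSpec]]
      obtain ⟨a, tl, hatl⟩ : ∃ a tl, splitSpec t [] = a :: tl := by
        cases hsp : splitSpec t [] with
        | nil => exact absurd hsp (splitSpec_ne_nil t [])
        | cons a tl => exact ⟨a, tl, rfl⟩
      rw [hatl, intercalate_cons₂, ← hatl, ih []]
      simp
    · rw [show splitSpec (c :: t) cur = splitSpec t (c :: cur) by simp [splitSpec, hc], ih (c :: cur)]
      simp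

-- the join-of-prefixed-lines loop equals "data: " ++ repSpec l ++ "\n\n"
theorem join_map_splitSpec (l : List Char) : ∀ (cur : List Char),
    List.intercalate []
        ((splitSpec l cur).map (fun ln => ['d', 'a', 't', 'a', ':', ' '] ++ ln ++ ['\n'])) ++ ['\n']
      = ['d', 'a', 't', 'a', ':', ' '] ++ cur.reverse ++ repSpec l ++ ['\n', '\n'] := by
  induction l with
  | nil => intro cur; simp [splitSpec, repSpec, List.intercalate]
  | cons c t ih =>
    intro cur
    by_cases hc : c = '\n'
    · subst hc
      rw [show splitSpec ('\n' :: t) cur = cur.reverse :: splitSpec t [] by simp [splitSpec]]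
      obtain ⟨a, tl, hatl⟩ : ∃ a tl, splitSpec t [] = a :: tl := by
        cases hsp : splitSpec t [] with
        | nil => exact absurd hsp (splitSpec_ne_nil t [])
        | cons a tl => exact ⟨a, tl, rfl⟩
      rw [hatl, List.map_cons, List.map_cons, intercalate_cons₂]
      have hih := ih []
      rw [hatl, List.map_cons] at hih
      simp only [List.reverse_nil] at hih
      rw [show repSpec ('\n' :: t) = ['\n', 'd', 'a', 't', 'a', ':', ' '] ++ repSpec t by
        simp [repSpec]]
      simp only [List.append_assoc, List.append_nil] at hih ⊢
      rw [hih]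
      simp
    · rw [show splitSpec (c :: t) cur = splitSpec t (c :: cur) by simp [splitSpec, hc],
          show repSpec (c :: t) = c :: repSpec t by simp [repSpec, hc], ih (c :: cur)]
      simp

-- ===== VERDICT (by name: the statement is the Claim_ definition above) =====
theorem sse_data_spec : Claim_equal_sse_data := by
  intro content _
  unfold Spec_sse_data sse_data sse_data_alt
  by_cases hg : content.toList = [] ∨ PySem.Chars.strip content.toList = []
  · rw [if_pos hg, if_pos hg]
  · rw [if_neg hg, if_neg hg]
    simp only [show "\n".toList = ['\n'] from rfl,
      show "\ndata: ".toList = ['\n', 'd', 'a', 't', 'a', ':', ' '] from rfl,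
      show "data: ".toList = ['d', 'a', 't', 'a', ':', ' '] from rfl,
      show "\n\n".toList = ['\n', '\n'] from rfl,
      splitOn_eq_splitSpec, replace_eq_repSpec, PySem.Chars.join]
    set cs := content.toList with hcs
    by_cases h1 : (splitSpec cs []).length = 1
    · obtain ⟨x, hx⟩ : ∃ x, splitSpec cs [] = [x] := by
        cases hsp : splitSpec cs [] with
        | nil => simp [hsp] at h1
        | cons a tl => cases tl with
          | nil => exact ⟨a, rfl⟩
          | cons b tl2 => simp [hsp] at h1
      have hxcs : x = cs := by
        have h := join_splitSpec cs []
        rw [hx] at h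
        simpa [List.intercalate] using h
      have hm := join_map_splitSpec cs []
      rw [hx, hxcs] at hm
      simp only [List.reverse_nil, List.map_cons, List.map_nil,
        List.intercalate] at hm
      simp only [if_pos h1]
      congr 1
      have hrc : cs = repSpec cs := by simpa using hm
      rw [← hrc]
    · simp only [if_neg h1]
      congr 1
      have hm := join_map_splitSpec cs []
      simpa using hm
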